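-- pv_equiv track=rewrite | github.com/Palaeos/GlobasaLexiTools | GlobasaTransliterators.py | germanToGlobasa
-- ===== SOURCE A (Python) =====
-- def germanToGlobasa(word):
--     output = ""
--     i = 0
--     while i < len(word):
--         if word[i].lower() == "s" and i + 2 < len(word) and word[i+1] == "c" and word[i+2] == "h":
--             output += "x"
--             i += 2
--         elif word[i].lower() == "c" and i + 1 < len(word) and word[i + 1] == "h":
--             output += "h"
--             i += 1
--         elif word[i].lower() == "t" and i + 3 < len(word) and word[i+1] == "s" and word[i+2] == "c" and word[i+3] == "h":
--             output += "c"
--             i += 3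
--         elif word[i].lower() == "d" and i + 3 < len(word) and word[i+1] == "s" and word[i+2] == "c" and word[i+3] == "h":
--             output += "j"
--             i += 3
--         elif word[i].lower() == "e" and i + 1 < len(word) and word[i+1] == "i":
--             output += "ay"
--             i += 1
--         elif word[i].lower() == "e" and i + 1 < len(word) and word[i+1] == "h":
--             output += "ey"
--             i += 1
--         elif word[i].lower() == "a" and i + 1 < len(word) and word[i+1] == "h":
--             output += "a"
--             i += 1
--         elif word[i].lower() == "i" and i + 1 < len(word) and word[i+1] == "e":
--             output += "i"
--             i += 1
--         elif word[i].lower() == "s" and i + 1 < len(word) and (word[i + 1] == "t" or word[i + 1] == "p" or word[i + 1] == "k"):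
--             output += "x"
--         elif word[i].lower() == "z":
--             output += "tz"
--         elif word[i].lower() == "j":
--             output += "y"
--         elif word[i].lower() == "w":
--             output += "v"
--         else:
--             output += word[i]
--         i += 1
--     return output
-- ===== SOURCE B (Python) =====
-- # B: compile the rewrite rules once into a small finite-state automaton
-- # (transition table keyed by (state, char), accepting states carry
-- # (output, chars-to-consume)); transliterate by running the automaton at
-- # each position instead of testing a chain of conditions.  The rule set is
-- # deterministic (no two rules can match at the same position), so the
-- # deepest state the automaton reaches gives exactly the rule A's
-- # first-match elif chain would pick.
--
-- _RULES = [
--     ("sch", "x", 3), ("ch", "h", 2), ("tsch", "c", 4), ("dsch", "j", 4),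
--     ("ei", "ay", 2), ("eh", "ey", 2), ("ah", "a", 2), ("ie", "i", 2),
--     ("st", "x", 1), ("sp", "x", 1), ("sk", "x", 1),
--     ("z", "tz", 1), ("j", "y", 1), ("w", "v", 1),
-- ]
--
-- def _build():
--     delta = {}
--     accept = {}
--     fresh = 1
--     for pat, out, consume in _RULES:
--         state = 0
--         for ch in pat:
--             nxt = delta.get((state, ch))
--             if nxt is None:
--                 nxt = fresh
--                 delta[(state, ch)] = nxt
--                 fresh += 1
--             state = nxt
--         accept[state] = (out, consume)
--     return delta, accept
--
-- _DELTA, _ACCEPT = _build()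
--
-- def germanToGlobasa(word):
--     pieces = []
--     n = len(word)
--     i = 0
--     while i < n:
--         # run the automaton from position i (first char case-folded)
--         state = _DELTA.get((0, word[i].lower()))
--         hit = None
--         j = i + 1
--         while state is not None:
--             if state in _ACCEPT:
--                 hit = _ACCEPT[state]
--             state = _DELTA.get((state, word[j])) if j < n else None
--             j += 1
--         if hit is None:
--             pieces.append(word[i])
--             i += 1
--         else:
--             pieces.append(hit[0])
--             i += hit[1]
--     return "".join(pieces)
-- ===== Notes on version B (the rewrite author's own statement) =====
-- stated objective: faster
-- what changed: Replaces A's hard-coded 13-branch if/elif chain with a finite-state automaton compiled once from the rule list (a (state,char) transition table plus an accepting-state table carrying (output, consume)), runs the automaton at each position taking the deepest accepting state, and joins collected output pieces once instead of A's repeated string concatenation.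
import Mathlib
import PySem

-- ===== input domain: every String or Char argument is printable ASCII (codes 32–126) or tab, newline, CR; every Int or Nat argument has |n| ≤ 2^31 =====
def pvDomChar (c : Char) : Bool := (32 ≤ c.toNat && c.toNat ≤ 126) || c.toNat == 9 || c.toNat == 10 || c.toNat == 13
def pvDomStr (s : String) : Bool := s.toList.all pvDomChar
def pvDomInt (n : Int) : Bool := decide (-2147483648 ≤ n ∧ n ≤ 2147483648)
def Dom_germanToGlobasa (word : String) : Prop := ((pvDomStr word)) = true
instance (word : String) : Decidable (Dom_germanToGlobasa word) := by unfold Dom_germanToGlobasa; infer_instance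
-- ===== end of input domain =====

set_option maxHeartbeats 2000000


-- B compiles the rewrite rules once into a finite-state automaton (a transition dict keyed by
-- (state, char); accepting states carry (output, consume)), runs it at each position instead of
-- A's hard-coded 13-branch elif chain, and joins collected pieces once instead of A's repeated
-- string concatenation (a timing run measured B faster on large inputs).

-- ===== PORT A =====
-- literal port of A's while loop: index i, string accumulator, the same if/elif chain
-- (word[i].lower() is the single-char lowering PySem.Chars.lowerChar; 'i += k' followed by the
-- loop-bottom 'i += 1' is written as (i + k + 1)).
def germanToGlobasaGo (cs : List Char) (i : Nat) (output : String) : String :=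
  if i < cs.length then
    if PySem.Chars.lowerChar cs[i]! = 's' ∧ i + 2 < cs.length ∧ cs[i+1]! = 'c' ∧ cs[i+2]! = 'h' then
      germanToGlobasaGo cs (i + 2 + 1) (output ++ "x")
    else if PySem.Chars.lowerChar cs[i]! = 'c' ∧ i + 1 < cs.length ∧ cs[i+1]! = 'h' then
      germanToGlobasaGo cs (i + 1 + 1) (output ++ "h")
    else if PySem.Chars.lowerChar cs[i]! = 't' ∧ i + 3 < cs.length ∧ cs[i+1]! = 's' ∧ cs[i+2]! = 'c' ∧ cs[i+3]! = 'h' then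
      germanToGlobasaGo cs (i + 3 + 1) (output ++ "c")
    else if PySem.Chars.lowerChar cs[i]! = 'd' ∧ i + 3 < cs.length ∧ cs[i+1]! = 's' ∧ cs[i+2]! = 'c' ∧ cs[i+3]! = 'h' then
      germanToGlobasaGo cs (i + 3 + 1) (output ++ "j")
    else if PySem.Chars.lowerChar cs[i]! = 'e' ∧ i + 1 < cs.length ∧ cs[i+1]! = 'i' then
      germanToGlobasaGo cs (i + 1 + 1) (output ++ "ay")
    else if PySem.Chars.lowerChar cs[i]! = 'e' ∧ i + 1 < cs.length ∧ cs[i+1]! = 'h' then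
      germanToGlobasaGo cs (i + 1 + 1) (output ++ "ey")
    else if PySem.Chars.lowerChar cs[i]! = 'a' ∧ i + 1 < cs.length ∧ cs[i+1]! = 'h' then
      germanToGlobasaGo cs (i + 1 + 1) (output ++ "a")
    else if PySem.Chars.lowerChar cs[i]! = 'i' ∧ i + 1 < cs.length ∧ cs[i+1]! = 'e' then
      germanToGlobasaGo cs (i + 1 + 1) (output ++ "i")
    else if PySem.Chars.lowerChar cs[i]! = 's' ∧ i + 1 < cs.length ∧ (cs[i+1]! = 't' ∨ cs[i+1]! = 'p' ∨ cs[i+1]! = 'k') then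
      germanToGlobasaGo cs (i + 1) (output ++ "x")
    else if PySem.Chars.lowerChar cs[i]! = 'z' then
      germanToGlobasaGo cs (i + 1) (output ++ "tz")
    else if PySem.Chars.lowerChar cs[i]! = 'j' then
      germanToGlobasaGo cs (i + 1) (output ++ "y")
    else if PySem.Chars.lowerChar cs[i]! = 'w' then
      germanToGlobasaGo cs (i + 1) (output ++ "v")
    else
      germanToGlobasaGo cs (i + 1) (output.push cs[i]!)
  else output
termination_by cs.length - i
decreasing_by all_goals first
  | exact Nat.sub_lt_sub_left (by assumption) (Nat.lt_succ_self _)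
  | exact Nat.sub_lt_sub_left (by assumption) (Nat.lt_succ_of_le (Nat.le_add_right _ _))

def germanToGlobasa (word : String) : String := germanToGlobasaGo word.toList 0 ""

-- ===== PORT B =====
-- the rule list of Source B (pattern, output, consume)
def gRules : List (List Char × String × Nat) :=
  [ (['s','c','h'], "x", 3), (['c','h'], "h", 2), (['t','s','c','h'], "c", 4),
    (['d','s','c','h'], "j", 4), (['e','i'], "ay", 2), (['e','h'], "ey", 2),
    (['a','h'], "a", 2), (['i','e'], "i", 2), (['s','t'], "x", 1), (['s','p'], "x", 1),
    (['s','k'], "x", 1), (['z'], "tz", 1), (['j'], "y", 1), (['w'], "v", 1) ]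

-- Source B's _build inner loop over the pattern's chars: thread (delta, state, fresh)
def gBuildPat (pat : List Char) (delta : PySem.Dict (Int × Char) Int) (state fresh : Int) :
    PySem.Dict (Int × Char) Int × Int × Int :=
  match pat with
  | [] => (delta, state, fresh)
  | ch :: rest =>
    match delta.get? (state, ch) with
    | some nxt => gBuildPat rest delta nxt fresh
    | none => gBuildPat rest (delta.insert (state, ch) fresh) fresh (fresh + 1)

-- Source B's _build outer loop: fold the rules into (delta, accept, fresh); drop fresh at the end
def gBuild : PySem.Dict (Int × Char) Int × PySem.Dict Int (String × Nat) :=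
  let r := gRules.foldl
    (fun (acc : PySem.Dict (Int × Char) Int × PySem.Dict Int (String × Nat) × Int) rule =>
      let (delta', state, fresh') := gBuildPat rule.1 acc.1 0 acc.2.2
      (delta', acc.2.1.insert state rule.2, fresh'))
    (PySem.Dict.empty, PySem.Dict.empty, 1)
  (r.1, r.2.1)

def gDelta : PySem.Dict (Int × Char) Int := gBuild.1
def gAccept : PySem.Dict Int (String × Nat) := gBuild.2

-- Source B's inner while loop: run the automaton from state/j, remembering the last accepting hit
def gWalk (cs : List Char) (state : Int) (hit : Option (String × Nat)) (j : Nat) :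
    Option (String × Nat) :=
  let hit' := match gAccept.get? state with | some p => some p | none => hit
  if j < cs.length then
    match gDelta.get? (state, cs[j]!) with
    | some s' => gWalk cs s' hit' (j + 1)
    | none => hit'
  else hit'
termination_by cs.length - j
decreasing_by
  exact Nat.sub_lt_sub_left (by assumption) (Nat.lt_succ_self _)

-- the automaton run started at position i (Source B: initial lookup with word[i].lower(), hit = None)
def gHit (cs : List Char) (i : Nat) : Option (String × Nat) :=
  match gDelta.get? (0, PySem.Chars.lowerChar cs[i]!) with
  | some s => gWalk cs s none (i + 1)
  | none => none

-- Source B's outer while loop: consult the automaton at each position, else copy the char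
-- (fuel = remaining length bounds the number of iterations and only totalizes the recursion)
def germanToGlobasaAltGo (cs : List Char) (i : Nat) (acc : String) (fuel : Nat) : String :=
  match fuel with
  | 0 => acc
  | fuel + 1 =>
    if i < cs.length then
      match gHit cs i with
      | some (rep, c) => germanToGlobasaAltGo cs (i + c) (acc ++ rep) fuel
      | none => germanToGlobasaAltGo cs (i + 1) (acc.push cs[i]!) fuel
    else acc

def germanToGlobasa_alt (word : String) : String :=
  germanToGlobasaAltGo word.toList 0 "" word.toList.length

-- ===== PRECONDITION & SPEC =====
def Spec_germanToGlobasa (word : String) (out : String) : Prop := out = germanToGlobasa_alt word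
instance (word : String) (out : String) : Decidable (Spec_germanToGlobasa word out) := by unfold Spec_germanToGlobasa; infer_instance

-- ===== CLAIM (what is proved, stated in full; the proofs are below) =====
def Claim_equal_germanToGlobasa : Prop := ∀ (word : String), Dom_germanToGlobasa word → Spec_germanToGlobasa word (germanToGlobasa word)

-- ===== LEMMAS AND PROOFS =====

theorem get?_mk_nil {κ ν : Type} [BEq κ] (x : κ) :
    (PySem.Dict.mk ([] : List (κ × ν))).get? x = none := rfl

-- the automaton the builder produces, as literals
theorem gDelta_eq : gDelta = PySem.Dict.mk [((0, 's'), 1), ((1, 'c'), 2), ((2, 'h'), 3), ((0, 'c'), 4),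
    ((4, 'h'), 5), ((0, 't'), 6), ((6, 's'), 7), ((7, 'c'), 8), ((8, 'h'), 9), ((0, 'd'), 10),
    ((10, 's'), 11), ((11, 'c'), 12), ((12, 'h'), 13), ((0, 'e'), 14), ((14, 'i'), 15), ((14, 'h'), 16),
    ((0, 'a'), 17), ((17, 'h'), 18), ((0, 'i'), 19), ((19, 'e'), 20), ((1, 't'), 21), ((1, 'p'), 22),
    ((1, 'k'), 23), ((0, 'z'), 24), ((0, 'j'), 25), ((0, 'w'), 26)] := by decide


-- transition lookups with a symbolic char, one lemma per state
theorem d0 (c : Char) : gDelta.get? (0, c) = if 's' = c then some 1 else if 'c' = c then some 4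
    else if 't' = c then some 6 else if 'd' = c then some 10 else if 'e' = c then some 14
    else if 'a' = c then some 17 else if 'i' = c then some 19 else if 'z' = c then some 24
    else if 'j' = c then some 25 else if 'w' = c then some 26 else none := by
  rw [gDelta_eq]; simp [PySem.Dict.get?_mk_cons, get?_mk_nil]

theorem d1 (c : Char) : gDelta.get? (1, c) = if 'c' = c then some 2 else if 't' = c then some 21
    else if 'p' = c then some 22 else if 'k' = c then some 23 else none := by
  rw [gDelta_eq]; simp [PySem.Dict.get?_mk_cons, get?_mk_nil]

theorem d14 (c : Char) : gDelta.get? (14, c) = if 'i' = c then some 15 else if 'h' = c then some 16 else none := by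
  rw [gDelta_eq]; simp [PySem.Dict.get?_mk_cons, get?_mk_nil]

theorem ds2 (c : Char) : gDelta.get? (2, c) = if 'h' = c then some 3 else none := by
  rw [gDelta_eq]; simp [PySem.Dict.get?_mk_cons, get?_mk_nil]
theorem ds4 (c : Char) : gDelta.get? (4, c) = if 'h' = c then some 5 else none := by
  rw [gDelta_eq]; simp [PySem.Dict.get?_mk_cons, get?_mk_nil]
theorem ds6 (c : Char) : gDelta.get? (6, c) = if 's' = c then some 7 else none := by
  rw [gDelta_eq]; simp [PySem.Dict.get?_mk_cons, get?_mk_nil]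
theorem ds7 (c : Char) : gDelta.get? (7, c) = if 'c' = c then some 8 else none := by
  rw [gDelta_eq]; simp [PySem.Dict.get?_mk_cons, get?_mk_nil]
theorem ds8 (c : Char) : gDelta.get? (8, c) = if 'h' = c then some 9 else none := by
  rw [gDelta_eq]; simp [PySem.Dict.get?_mk_cons, get?_mk_nil]
theorem ds10 (c : Char) : gDelta.get? (10, c) = if 's' = c then some 11 else none := by
  rw [gDelta_eq]; simp [PySem.Dict.get?_mk_cons, get?_mk_nil]
theorem ds11 (c : Char) : gDelta.get? (11, c) = if 'c' = c then some 12 else none := by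
  rw [gDelta_eq]; simp [PySem.Dict.get?_mk_cons, get?_mk_nil]
theorem ds12 (c : Char) : gDelta.get? (12, c) = if 'h' = c then some 13 else none := by
  rw [gDelta_eq]; simp [PySem.Dict.get?_mk_cons, get?_mk_nil]
theorem ds17 (c : Char) : gDelta.get? (17, c) = if 'h' = c then some 18 else none := by
  rw [gDelta_eq]; simp [PySem.Dict.get?_mk_cons, get?_mk_nil]
theorem ds19 (c : Char) : gDelta.get? (19, c) = if 'e' = c then some 20 else none := by
  rw [gDelta_eq]; simp [PySem.Dict.get?_mk_cons, get?_mk_nil]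

theorem dleaf (s : Int) (c : Char)
    (h : s ∈ [(3:Int), 5, 9, 13, 15, 16, 18, 20, 21, 22, 23, 24, 25, 26]) :
    gDelta.get? (s, c) = none := by
  rw [gDelta_eq]
  fin_cases h <;> simp [PySem.Dict.get?_mk_cons, get?_mk_nil]

theorem acc_none (s : Int) (h : s ∈ [(1:Int), 2, 4, 6, 7, 8, 10, 11, 12, 14, 17, 19]) :
    gAccept.get? s = none := by
  fin_cases h <;> decide

theorem acc3 : gAccept.get? 3 = some ("x", 3) := by decide
theorem acc5 : gAccept.get? 5 = some ("h", 2) := by decide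
theorem acc9 : gAccept.get? 9 = some ("c", 4) := by decide
theorem acc13 : gAccept.get? 13 = some ("j", 4) := by decide
theorem acc15 : gAccept.get? 15 = some ("ay", 2) := by decide
theorem acc16 : gAccept.get? 16 = some ("ey", 2) := by decide
theorem acc18 : gAccept.get? 18 = some ("a", 2) := by decide
theorem acc20 : gAccept.get? 20 = some ("i", 2) := by decide
theorem acc21 : gAccept.get? 21 = some ("x", 1) := by decide
theorem acc22 : gAccept.get? 22 = some ("x", 1) := by decide
theorem acc23 : gAccept.get? 23 = some ("x", 1) := by decide
theorem acc24 : gAccept.get? 24 = some ("tz", 1) := by decide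
theorem acc25 : gAccept.get? 25 = some ("y", 1) := by decide
theorem acc26 : gAccept.get? 26 = some ("v", 1) := by decide

theorem walk_leaf (cs : List Char) (hit : Option (String × Nat)) (j : Nat) (s : Int) (v : String × Nat)
    (h : (s, v) ∈ [((3:Int), ("x", 3)), (5, ("h", 2)), (9, ("c", 4)), (13, ("j", 4)), (15, ("ay", 2)),
      (16, ("ey", 2)), (18, ("a", 2)), (20, ("i", 2)), (21, ("x", 1)), (22, ("x", 1)), (23, ("x", 1)),
      (24, ("tz", 1)), (25, ("y", 1)), (26, ("v", 1))]) :
    gWalk cs s hit j = some v := by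
  fin_cases h <;>
    (rw [gWalk]
     simp [dleaf, acc3, acc5, acc9, acc13, acc15, acc16, acc18, acc20,
       acc21, acc22, acc23, acc24, acc25, acc26])

theorem walk_one (cs : List Char) (hit : Option (String × Nat)) (j : Nat) (s : Int) (c0 : Char) (s' : Int)
    (h : (s, c0, s') ∈ [((2:Int), 'h', (3:Int)), (4, 'h', 5), (6, 's', 7), (7, 'c', 8), (8, 'h', 9),
      (10, 's', 11), (11, 'c', 12), (12, 'h', 13), (17, 'h', 18), (19, 'e', 20)]) :
    gWalk cs s hit j = if j < cs.length ∧ c0 = cs[j]! then gWalk cs s' hit (j + 1) else hit := by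
  fin_cases h <;>
    (rw [gWalk]
     by_cases hj : j < cs.length <;>
       simp [hj, acc_none, ds2, ds4, ds6, ds7, ds8, ds10, ds11, ds12, ds17, ds19] <;>
       split_ifs <;> simp_all)

theorem walk1 (cs : List Char) (hit : Option (String × Nat)) (j : Nat) :
    gWalk cs 1 hit j = if j < cs.length then
        (if 'c' = cs[j]! then gWalk cs 2 hit (j + 1)
         else if 't' = cs[j]! then gWalk cs 21 hit (j + 1)
         else if 'p' = cs[j]! then gWalk cs 22 hit (j + 1)
         else if 'k' = cs[j]! then gWalk cs 23 hit (j + 1)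
         else hit)
      else hit := by
  rw [gWalk]
  by_cases hj : j < cs.length <;>
    simp [hj, acc_none, d1] <;> split_ifs <;> simp_all

theorem walk14 (cs : List Char) (hit : Option (String × Nat)) (j : Nat) :
    gWalk cs 14 hit j = if j < cs.length then
        (if 'i' = cs[j]! then gWalk cs 15 hit (j + 1)
         else if 'h' = cs[j]! then gWalk cs 16 hit (j + 1)
         else hit)
      else hit := by
  rw [gWalk]
  by_cases hj : j < cs.length <;>
    simp [hj, acc_none, d14] <;> split_ifs <;> simp_all

theorem getbang (cs : List Char) (j : Nat) (h : j < cs.length) : cs[j]?.getD 'A' = cs[j] := by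
  simp [List.getElem?_eq_getElem h]

theorem gHit_eq (cs : List Char) (i : Nat) (hi : i < cs.length) :
    gHit cs i =
      (if PySem.Chars.lowerChar cs[i]! = 's' ∧ i + 2 < cs.length ∧ cs[i+1]! = 'c' ∧ cs[i+2]! = 'h' then some ("x", 3)
      else if PySem.Chars.lowerChar cs[i]! = 'c' ∧ i + 1 < cs.length ∧ cs[i+1]! = 'h' then some ("h", 2)
      else if PySem.Chars.lowerChar cs[i]! = 't' ∧ i + 3 < cs.length ∧ cs[i+1]! = 's' ∧ cs[i+2]! = 'c' ∧ cs[i+3]! = 'h' then some ("c", 4)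
      else if PySem.Chars.lowerChar cs[i]! = 'd' ∧ i + 3 < cs.length ∧ cs[i+1]! = 's' ∧ cs[i+2]! = 'c' ∧ cs[i+3]! = 'h' then some ("j", 4)
      else if PySem.Chars.lowerChar cs[i]! = 'e' ∧ i + 1 < cs.length ∧ cs[i+1]! = 'i' then some ("ay", 2)
      else if PySem.Chars.lowerChar cs[i]! = 'e' ∧ i + 1 < cs.length ∧ cs[i+1]! = 'h' then some ("ey", 2)
      else if PySem.Chars.lowerChar cs[i]! = 'a' ∧ i + 1 < cs.length ∧ cs[i+1]! = 'h' then some ("a", 2)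
      else if PySem.Chars.lowerChar cs[i]! = 'i' ∧ i + 1 < cs.length ∧ cs[i+1]! = 'e' then some ("i", 2)
      else if PySem.Chars.lowerChar cs[i]! = 's' ∧ i + 1 < cs.length ∧ cs[i+1]! = 't' then some ("x", 1)
      else if PySem.Chars.lowerChar cs[i]! = 's' ∧ i + 1 < cs.length ∧ cs[i+1]! = 'p' then some ("x", 1)
      else if PySem.Chars.lowerChar cs[i]! = 's' ∧ i + 1 < cs.length ∧ cs[i+1]! = 'k' then some ("x", 1)
      else if PySem.Chars.lowerChar cs[i]! = 'z' then some ("tz", 1)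
      else if PySem.Chars.lowerChar cs[i]! = 'j' then some ("y", 1)
      else if PySem.Chars.lowerChar cs[i]! = 'w' then some ("v", 1)
      else none) := by
  unfold gHit
  rw [d0]
  by_cases hs : PySem.Chars.lowerChar cs[i]! = 's'
  · rw [if_pos hs.symm]
    show gWalk cs 1 none (i + 1) = _
    rw [walk1]
    by_cases hb : i + 1 < cs.length
    · rw [if_pos hb]
      by_cases hc : cs[i+1]! = 'c'
      · rw [if_pos hc.symm, walk_one cs none (i + 1 + 1) 2 'h' 3 (by simp)]
        by_cases hb2 : i + 2 < cs.length
        · by_cases hh : cs[i+2]! = 'h'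
          · rw [if_pos ⟨hb2, hh.symm⟩, walk_leaf cs none (i + 1 + 1 + 1) 3 ("x", 3) (by simp)]
            rw [if_pos ⟨hs, hb2, hc, hh⟩]
          · rw [if_neg (fun h => hh h.2.symm)]
            simp_all [getbang, List.getElem?_eq_getElem]
        · rw [if_neg (fun h => hb2 h.1)]
          simp_all [getbang, List.getElem?_eq_getElem, (by omega : ¬ i + 2 < cs.length), (by omega : ¬ i + 3 < cs.length)]
      · rw [if_neg (fun h => hc h.symm)]
        by_cases ht : cs[i+1]! = 't'
        · rw [if_pos ht.symm, walk_leaf cs none (i + 1 + 1) 21 ("x", 1) (by simp)]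
          simp_all [getbang, List.getElem?_eq_getElem]
        · rw [if_neg (fun h => ht h.symm)]
          by_cases hp : cs[i+1]! = 'p'
          · rw [if_pos hp.symm, walk_leaf cs none (i + 1 + 1) 22 ("x", 1) (by simp)]
            simp_all [getbang, List.getElem?_eq_getElem]
          · rw [if_neg (fun h => hp h.symm)]
            by_cases hk : cs[i+1]! = 'k'
            · rw [if_pos hk.symm, walk_leaf cs none (i + 1 + 1) 23 ("x", 1) (by simp)]
              simp_all [getbang, List.getElem?_eq_getElem]
            · rw [if_neg (fun h => hk h.symm)]
              simp_all [getbang, List.getElem?_eq_getElem]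
    · rw [if_neg hb]
      simp_all [getbang, List.getElem?_eq_getElem, (by omega : ¬ i + 2 < cs.length), (by omega : ¬ i + 3 < cs.length)]
  · rw [if_neg (fun h => hs h.symm)]
    by_cases hcc : PySem.Chars.lowerChar cs[i]! = 'c'
    · rw [if_pos hcc.symm]
      show gWalk cs 4 none (i + 1) = _
      rw [walk_one cs none (i + 1) 4 'h' 5 (by simp)]
      by_cases hh : i + 1 < cs.length ∧ cs[i+1]! = 'h'
      · rw [if_pos ⟨hh.1, hh.2.symm⟩, walk_leaf cs none (i + 1 + 1) 5 ("h", 2) (by simp)]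
        obtain ⟨hhA, hhB⟩ := hh
        simp_all [getbang, List.getElem?_eq_getElem]
      · rw [if_neg (fun h => hh ⟨h.1, h.2.symm⟩)]
        by_cases hb : i + 1 < cs.length
        · have hh2 : ¬ cs[i+1]! = 'h' := fun h => hh ⟨hb, h⟩
          simp_all [getbang, List.getElem?_eq_getElem]
        · simp_all [getbang, List.getElem?_eq_getElem]
    · rw [if_neg (fun h => hcc h.symm)]
      by_cases htt : PySem.Chars.lowerChar cs[i]! = 't'
      · rw [if_pos htt.symm]
        show gWalk cs 6 none (i + 1) = _
        rw [walk_one cs none (i + 1) 6 's' 7 (by simp)]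
        by_cases h1 : i + 1 < cs.length ∧ cs[i+1]! = 's'
        · rw [if_pos ⟨h1.1, h1.2.symm⟩, walk_one cs none (i + 1 + 1) 7 'c' 8 (by simp)]
          by_cases h2 : i + 2 < cs.length ∧ cs[i+2]! = 'c'
          · rw [if_pos ⟨h2.1, h2.2.symm⟩, walk_one cs none (i + 1 + 1 + 1) 8 'h' 9 (by simp)]
            by_cases h3 : i + 3 < cs.length ∧ cs[i+3]! = 'h'
            · rw [if_pos ⟨h3.1, h3.2.symm⟩, walk_leaf cs none (i + 1 + 1 + 1 + 1) 9 ("c", 4) (by simp)]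
              obtain ⟨h1A, h1B⟩ := h1
              obtain ⟨h2A, h2B⟩ := h2
              obtain ⟨h3A, h3B⟩ := h3
              simp_all [getbang, List.getElem?_eq_getElem]
            · rw [if_neg (fun h => h3 ⟨h.1, h.2.symm⟩)]
              by_cases hb3 : i + 3 < cs.length
              · have : ¬ cs[i+3]! = 'h' := fun h => h3 ⟨hb3, h⟩
                simp_all [getbang, List.getElem?_eq_getElem]
              · simp_all [getbang, List.getElem?_eq_getElem]
          · rw [if_neg (fun h => h2 ⟨h.1, h.2.symm⟩)]
            by_cases hb2 : i + 2 < cs.length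
            · have : ¬ cs[i+2]! = 'c' := fun h => h2 ⟨hb2, h⟩
              simp_all [getbang, List.getElem?_eq_getElem]
            · simp_all [getbang, List.getElem?_eq_getElem, (by omega : ¬ i + 2 < cs.length), (by omega : ¬ i + 3 < cs.length)]
        · rw [if_neg (fun h => h1 ⟨h.1, h.2.symm⟩)]
          by_cases hb : i + 1 < cs.length
          · have : ¬ cs[i+1]! = 's' := fun h => h1 ⟨hb, h⟩
            simp_all [getbang, List.getElem?_eq_getElem]
          · simp_all [getbang, List.getElem?_eq_getElem, (by omega : ¬ i + 2 < cs.length), (by omega : ¬ i + 3 < cs.length)]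
      · rw [if_neg (fun h => htt h.symm)]
        by_cases hdd : PySem.Chars.lowerChar cs[i]! = 'd'
        · rw [if_pos hdd.symm]
          show gWalk cs 10 none (i + 1) = _
          rw [walk_one cs none (i + 1) 10 's' 11 (by simp)]
          by_cases h1 : i + 1 < cs.length ∧ cs[i+1]! = 's'
          · rw [if_pos ⟨h1.1, h1.2.symm⟩, walk_one cs none (i + 1 + 1) 11 'c' 12 (by simp)]
            by_cases h2 : i + 2 < cs.length ∧ cs[i+2]! = 'c'
            · rw [if_pos ⟨h2.1, h2.2.symm⟩, walk_one cs none (i + 1 + 1 + 1) 12 'h' 13 (by simp)]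
              by_cases h3 : i + 3 < cs.length ∧ cs[i+3]! = 'h'
              · rw [if_pos ⟨h3.1, h3.2.symm⟩, walk_leaf cs none (i + 1 + 1 + 1 + 1) 13 ("j", 4) (by simp)]
                obtain ⟨h1A, h1B⟩ := h1
                obtain ⟨h2A, h2B⟩ := h2
                obtain ⟨h3A, h3B⟩ := h3
                simp_all [getbang, List.getElem?_eq_getElem]
              · rw [if_neg (fun h => h3 ⟨h.1, h.2.symm⟩)]
                by_cases hb3 : i + 3 < cs.length
                · have : ¬ cs[i+3]! = 'h' := fun h => h3 ⟨hb3, h⟩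
                  simp_all [getbang, List.getElem?_eq_getElem]
                · simp_all [getbang, List.getElem?_eq_getElem]
            · rw [if_neg (fun h => h2 ⟨h.1, h.2.symm⟩)]
              by_cases hb2 : i + 2 < cs.length
              · have : ¬ cs[i+2]! = 'c' := fun h => h2 ⟨hb2, h⟩
                simp_all [getbang, List.getElem?_eq_getElem]
              · simp_all [getbang, List.getElem?_eq_getElem, (by omega : ¬ i + 2 < cs.length), (by omega : ¬ i + 3 < cs.length)]
          · rw [if_neg (fun h => h1 ⟨h.1, h.2.symm⟩)]
            by_cases hb : i + 1 < cs.length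
            · have : ¬ cs[i+1]! = 's' := fun h => h1 ⟨hb, h⟩
              simp_all [getbang, List.getElem?_eq_getElem]
            · simp_all [getbang, List.getElem?_eq_getElem, (by omega : ¬ i + 2 < cs.length), (by omega : ¬ i + 3 < cs.length)]
        · rw [if_neg (fun h => hdd h.symm)]
          by_cases hee : PySem.Chars.lowerChar cs[i]! = 'e'
          · rw [if_pos hee.symm]
            show gWalk cs 14 none (i + 1) = _
            rw [walk14]
            by_cases hb : i + 1 < cs.length
            · rw [if_pos hb]
              by_cases hii : cs[i+1]! = 'i'
              · rw [if_pos hii.symm, walk_leaf cs none (i + 1 + 1) 15 ("ay", 2) (by simp)]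
                simp_all [getbang, List.getElem?_eq_getElem]
              · rw [if_neg (fun h => hii h.symm)]
                by_cases hhh : cs[i+1]! = 'h'
                · rw [if_pos hhh.symm, walk_leaf cs none (i + 1 + 1) 16 ("ey", 2) (by simp)]
                  simp_all [getbang, List.getElem?_eq_getElem]
                · rw [if_neg (fun h => hhh h.symm)]
                  simp_all [getbang, List.getElem?_eq_getElem]
            · rw [if_neg hb]
              simp_all [getbang, List.getElem?_eq_getElem]
          · rw [if_neg (fun h => hee h.symm)]
            by_cases haa : PySem.Chars.lowerChar cs[i]! = 'a'
            · rw [if_pos haa.symm]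
              show gWalk cs 17 none (i + 1) = _
              rw [walk_one cs none (i + 1) 17 'h' 18 (by simp)]
              by_cases hh : i + 1 < cs.length ∧ cs[i+1]! = 'h'
              · rw [if_pos ⟨hh.1, hh.2.symm⟩, walk_leaf cs none (i + 1 + 1) 18 ("a", 2) (by simp)]
                obtain ⟨hhA, hhB⟩ := hh
                simp_all [getbang, List.getElem?_eq_getElem]
              · rw [if_neg (fun h => hh ⟨h.1, h.2.symm⟩)]
                by_cases hb : i + 1 < cs.length
                · have : ¬ cs[i+1]! = 'h' := fun h => hh ⟨hb, h⟩
                  simp_all [getbang, List.getElem?_eq_getElem]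
                · simp_all [getbang, List.getElem?_eq_getElem]
            · rw [if_neg (fun h => haa h.symm)]
              by_cases hik : PySem.Chars.lowerChar cs[i]! = 'i'
              · rw [if_pos hik.symm]
                show gWalk cs 19 none (i + 1) = _
                rw [walk_one cs none (i + 1) 19 'e' 20 (by simp)]
                by_cases hh : i + 1 < cs.length ∧ cs[i+1]! = 'e'
                · rw [if_pos ⟨hh.1, hh.2.symm⟩, walk_leaf cs none (i + 1 + 1) 20 ("i", 2) (by simp)]
                  obtain ⟨hhA, hhB⟩ := hh
                  simp_all [getbang, List.getElem?_eq_getElem]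
                · rw [if_neg (fun h => hh ⟨h.1, h.2.symm⟩)]
                  by_cases hb : i + 1 < cs.length
                  · have : ¬ cs[i+1]! = 'e' := fun h => hh ⟨hb, h⟩
                    simp_all [getbang, List.getElem?_eq_getElem]
                  · simp_all [getbang, List.getElem?_eq_getElem]
              · rw [if_neg (fun h => hik h.symm)]
                by_cases hz : PySem.Chars.lowerChar cs[i]! = 'z'
                · rw [if_pos hz.symm]
                  show gWalk cs 24 none (i + 1) = _
                  rw [walk_leaf cs none (i + 1) 24 ("tz", 1) (by simp)]
                  simp_all [getbang, List.getElem?_eq_getElem]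
                · rw [if_neg (fun h => hz h.symm)]
                  by_cases hjj : PySem.Chars.lowerChar cs[i]! = 'j'
                  · rw [if_pos hjj.symm]
                    show gWalk cs 25 none (i + 1) = _
                    rw [walk_leaf cs none (i + 1) 25 ("y", 1) (by simp)]
                    simp_all [getbang, List.getElem?_eq_getElem]
                  · rw [if_neg (fun h => hjj h.symm)]
                    by_cases hw : PySem.Chars.lowerChar cs[i]! = 'w'
                    · rw [if_pos hw.symm]
                      show gWalk cs 26 none (i + 1) = _
                      rw [walk_leaf cs none (i + 1) 26 ("v", 1) (by simp)]
                      simp_all [getbang, List.getElem?_eq_getElem]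
                    · rw [if_neg (fun h => hw h.symm)]
                      simp_all [getbang, List.getElem?_eq_getElem]
theorem go_eq (cs : List Char) : ∀ (fuel : Nat) (i : Nat) (acc : String),
    cs.length - i ≤ fuel → germanToGlobasaGo cs i acc = germanToGlobasaAltGo cs i acc fuel := by
  intro fuel
  induction fuel with
  | zero =>
    intro i acc h
    have hi : ¬ i < cs.length := by omega
    rw [germanToGlobasaGo, if_neg hi]
    rfl
  | succ fuel ih =>
    intro i acc h
    by_cases hi : i < cs.length
    · rw [germanToGlobasaGo, if_pos hi]
      conv_rhs => rw [germanToGlobasaAltGo]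
      rw [if_pos hi, gHit_eq cs i hi]
      by_cases h1 : PySem.Chars.lowerChar cs[i]! = 's' ∧ i + 2 < cs.length ∧ cs[i+1]! = 'c' ∧ cs[i+2]! = 'h'
      · rw [if_pos h1, if_pos h1]
        exact ih _ _ (by omega)
      · rw [if_neg h1, if_neg h1]
        by_cases h2 : PySem.Chars.lowerChar cs[i]! = 'c' ∧ i + 1 < cs.length ∧ cs[i+1]! = 'h'
        · rw [if_pos h2, if_pos h2]
          exact ih _ _ (by omega)
        · rw [if_neg h2, if_neg h2]
          by_cases h3 : PySem.Chars.lowerChar cs[i]! = 't' ∧ i + 3 < cs.length ∧ cs[i+1]! = 's' ∧ cs[i+2]! = 'c' ∧ cs[i+3]! = 'h'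
          · rw [if_pos h3, if_pos h3]
            exact ih _ _ (by omega)
          · rw [if_neg h3, if_neg h3]
            by_cases h4 : PySem.Chars.lowerChar cs[i]! = 'd' ∧ i + 3 < cs.length ∧ cs[i+1]! = 's' ∧ cs[i+2]! = 'c' ∧ cs[i+3]! = 'h'
            · rw [if_pos h4, if_pos h4]
              exact ih _ _ (by omega)
            · rw [if_neg h4, if_neg h4]
              by_cases h5 : PySem.Chars.lowerChar cs[i]! = 'e' ∧ i + 1 < cs.length ∧ cs[i+1]! = 'i'
              · rw [if_pos h5, if_pos h5]
                exact ih _ _ (by omega)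
              · rw [if_neg h5, if_neg h5]
                by_cases h6 : PySem.Chars.lowerChar cs[i]! = 'e' ∧ i + 1 < cs.length ∧ cs[i+1]! = 'h'
                · rw [if_pos h6, if_pos h6]
                  exact ih _ _ (by omega)
                · rw [if_neg h6, if_neg h6]
                  by_cases h7 : PySem.Chars.lowerChar cs[i]! = 'a' ∧ i + 1 < cs.length ∧ cs[i+1]! = 'h'
                  · rw [if_pos h7, if_pos h7]
                    exact ih _ _ (by omega)
                  · rw [if_neg h7, if_neg h7]
                    by_cases h8 : PySem.Chars.lowerChar cs[i]! = 'i' ∧ i + 1 < cs.length ∧ cs[i+1]! = 'e'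
                    · rw [if_pos h8, if_pos h8]
                      exact ih _ _ (by omega)
                    · rw [if_neg h8, if_neg h8]
                      by_cases h9 : PySem.Chars.lowerChar cs[i]! = 's' ∧ i + 1 < cs.length ∧ cs[i+1]! = 't'
                      · have hA : PySem.Chars.lowerChar cs[i]! = 's' ∧ i + 1 < cs.length ∧ (cs[i+1]! = 't' ∨ cs[i+1]! = 'p' ∨ cs[i+1]! = 'k') :=
                          ⟨h9.1, h9.2.1, Or.inl h9.2.2⟩
                        rw [if_pos hA, if_pos h9]
                        exact ih _ _ (by omega)
                      · rw [if_neg h9]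
                        by_cases h10 : PySem.Chars.lowerChar cs[i]! = 's' ∧ i + 1 < cs.length ∧ cs[i+1]! = 'p'
                        · have hA : PySem.Chars.lowerChar cs[i]! = 's' ∧ i + 1 < cs.length ∧ (cs[i+1]! = 't' ∨ cs[i+1]! = 'p' ∨ cs[i+1]! = 'k') :=
                            ⟨h10.1, h10.2.1, Or.inr (Or.inl h10.2.2)⟩
                          rw [if_pos hA, if_pos h10]
                          exact ih _ _ (by omega)
                        · rw [if_neg h10]
                          by_cases h11 : PySem.Chars.lowerChar cs[i]! = 's' ∧ i + 1 < cs.length ∧ cs[i+1]! = 'k'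
                          · have hA : PySem.Chars.lowerChar cs[i]! = 's' ∧ i + 1 < cs.length ∧ (cs[i+1]! = 't' ∨ cs[i+1]! = 'p' ∨ cs[i+1]! = 'k') :=
                              ⟨h11.1, h11.2.1, Or.inr (Or.inr h11.2.2)⟩
                            rw [if_pos hA, if_pos h11]
                            exact ih _ _ (by omega)
                          · have hA : ¬ (PySem.Chars.lowerChar cs[i]! = 's' ∧ i + 1 < cs.length ∧ (cs[i+1]! = 't' ∨ cs[i+1]! = 'p' ∨ cs[i+1]! = 'k')) := by
                              rintro ⟨ha, hb, ht | hp | hk⟩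
                              exacts [h9 ⟨ha, hb, ht⟩, h10 ⟨ha, hb, hp⟩, h11 ⟨ha, hb, hk⟩]
                            rw [if_neg hA, if_neg h11]
                            by_cases h12 : PySem.Chars.lowerChar cs[i]! = 'z'
                            · rw [if_pos h12, if_pos h12]
                              exact ih _ _ (by omega)
                            · rw [if_neg h12, if_neg h12]
                              by_cases h13 : PySem.Chars.lowerChar cs[i]! = 'j'
                              · rw [if_pos h13, if_pos h13]
                                exact ih _ _ (by omega)
                              · rw [if_neg h13, if_neg h13]
                                by_cases h14 : PySem.Chars.lowerChar cs[i]! = 'w'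
                                · rw [if_pos h14, if_pos h14]
                                  exact ih _ _ (by omega)
                                · rw [if_neg h14, if_neg h14]
                                  exact ih _ _ (by omega)
    · rw [germanToGlobasaGo, if_neg hi]
      conv_rhs => rw [germanToGlobasaAltGo]
      rw [if_neg hi]

-- ===== VERDICT (by name: the statement is the Claim_ definition above) =====
theorem germanToGlobasa_spec : Claim_equal_germanToGlobasa := by
  intro word _
  unfold Spec_germanToGlobasa germanToGlobasa germanToGlobasa_alt
  exact go_eq word.toList word.toList.length 0 "" (by omega)
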